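-- pv_equiv track=rewrite | github.com/AaronXu9/SmartEnumeration | edit_mel_cap.py | split_sdf_entries
-- ===== SOURCE A (Python) =====
-- def split_sdf_entries(text: str) -> list[tuple[str, str]]:
--     """Split an SDF file into (mol_block, data_block) pairs.
--
--     mol_block ends at the line "M  END" (inclusive)
--     data_block is everything after M END up to the $$$$ terminator (exclusive)
--     """
--     out: list[tuple[str, str]] = []
--     # Normalize line endings and split on $$$$ record separator
--     raw_entries = text.replace("\r\n", "\n").split("$$$$\n")
--     for raw in raw_entries:
--         if not raw.strip():
--             continue
--         # Find "M  END" terminator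
--         end_idx = raw.find("M  END")
--         if end_idx < 0:
--             continue
--         # Include the M END line fully
--         nl = raw.find("\n", end_idx)
--         mol_block = raw[:nl+1] if nl != -1 else raw
--         data_block = raw[nl+1:] if nl != -1 else ""
--         out.append((mol_block, data_block))
--     return out
-- ===== SOURCE B (Python) =====
-- def split_sdf_entries(text: str) -> list[tuple[str, str]]:
--     """Split an SDF file into (mol_block, data_block) pairs.
--
--     Single line-oriented pass: lines go into the current record's mol part
--     until one containing "M  END" has been seen (that line included), then
--     into the data part; a complete "$$$$" line terminates the record, and a
--     record is emitted only if it contained "M  END".  The text after the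
--     last newline is an unterminated line and is kept as record content.
--     """
--     out: list[tuple[str, str]] = []
--     mol: list[str] = []
--     data: list[str] = []
--     seen = False
--     *body, tail = text.replace("\r\n", "\n").split("\n")
--     for line in body:
--         if line == "$$$$":
--             if seen:
--                 out.append(("".join(mol), "".join(data)))
--             mol, data, seen = [], [], False
--         elif seen:
--             data.append(line + "\n")
--         else:
--             mol.append(line + "\n")
--             if "M  END" in line:
--                 seen = True
--     if seen:
--         data.append(tail)
--     else:
--         mol.append(tail)
--         seen = "M  END" in tail
--     if seen:
--         out.append(("".join(mol), "".join(data)))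
--     return out
-- ===== Notes on version B (the rewrite author's own statement) =====
-- stated objective: alternative
-- what changed: Replaces A's up-front split on "$$$$\n" followed by per-record substring find/slice with a single line-oriented pass that routes each line into the current record's mol or data part via a seen-"M END" state machine and flushes the record on a complete "$$$$" line; Pre_ excludes texts in which a non-final line ends with "$$$$" without being exactly "$$$$" (A's split then cuts the record in the middle of that line, a malformed-SDF corner where either reading is defensible).
-- outside the precondition, e.g. on split_sdf_entries('a$$$$\nM  END\n'): A returns [('M  END\n', '')], B returns [('a$$$$\nM  END\n', '')]
import Mathlib
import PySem

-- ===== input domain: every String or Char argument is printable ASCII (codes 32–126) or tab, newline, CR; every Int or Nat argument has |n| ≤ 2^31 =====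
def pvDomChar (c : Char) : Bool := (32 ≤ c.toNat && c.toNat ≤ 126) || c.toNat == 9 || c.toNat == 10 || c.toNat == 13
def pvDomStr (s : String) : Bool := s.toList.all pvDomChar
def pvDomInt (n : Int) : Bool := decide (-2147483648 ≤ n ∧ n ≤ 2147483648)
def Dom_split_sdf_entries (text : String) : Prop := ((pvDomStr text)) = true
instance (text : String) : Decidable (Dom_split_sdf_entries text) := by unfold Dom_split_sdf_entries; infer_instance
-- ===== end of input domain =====

-- B re-implements A's split-on-"$$$$\n"-then-find scan as a single line-oriented
-- pass with a seen-"M  END" state machine (objective: alternative decomposition, same cost).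

-- ===== PORT A =====
def split_sdf_entries (text : String) : List (String × String) :=
  -- raw_entries = text.replace("\r\n", "\n").split("$$$$\n")
  let rawEntries := PySem.Chars.splitOn
    (PySem.Chars.replace text.toList "\r\n".toList "\n".toList) "$$$$\n".toList
  rawEntries.foldl (fun out raw =>
    if (PySem.Chars.strip raw).isEmpty then out          -- if not raw.strip(): continue
    else
      let endIdx := PySem.Chars.find raw "M  END".toList -- raw.find("M  END")
      if endIdx < 0 then out                             -- continue
      else
        let nl := PySem.Chars.findFrom raw "\n".toList endIdx  -- raw.find("\n", end_idx)
        let molBlock := if nl ≠ -1 then String.ofList (PySem.List.slice raw none (some (nl+1)))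
                        else String.ofList raw
        let dataBlock := if nl ≠ -1 then String.ofList (PySem.List.slice raw (some (nl+1)) none)
                         else ""
        out ++ [(molBlock, dataBlock)]) []

-- ===== PORT B =====
-- the body of B's `for line in body` loop, acting on (out, mol, data, seen)
def pvStepAlt (st : List (String × String) × List (List Char) × List (List Char) × Bool)
    (line : List Char) :
    List (String × String) × List (List Char) × List (List Char) × Bool :=
  match st with
  | (out, mol, data, seen) =>
    if line = "$$$$".toList then
      ((if seen then
          out ++ [(String.ofList (PySem.Chars.join [] mol), String.ofList (PySem.Chars.join [] data))]
        else out), [], [], false)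
    else if seen then (out, mol, data ++ [line ++ "\n".toList], true)
    else (out, mol ++ [line ++ "\n".toList], data, PySem.Chars.isIn "M  END".toList line)

def split_sdf_entries_alt (text : String) : List (String × String) :=
  let lines := PySem.Chars.splitOn
    (PySem.Chars.replace text.toList "\r\n".toList "\n".toList) "\n".toList
  -- `*body, tail = ...` : lines is never empty, so body = lines[:-1], tail = lines[-1]
  let body := lines.dropLast
  let tail := lines.getLastD []
  let st := body.foldl pvStepAlt ([], [], [], false)
  -- feed the unterminated tail
  let st2 := if st.2.2.2 then (st.1, st.2.1, st.2.2.1 ++ [tail], true)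
             else (st.1, st.2.1 ++ [tail], st.2.2.1, PySem.Chars.isIn "M  END".toList tail)
  if st2.2.2.2 then
    st2.1 ++ [(String.ofList (PySem.Chars.join [] st2.2.1), String.ofList (PySem.Chars.join [] st2.2.2.1))]
  else st2.1

-- ===== PRECONDITION & SPEC =====
-- Pre_ excludes texts in which some non-final line ends with "$$$$" without being exactly
-- "$$$$": A's split on "$$$$\n" then cuts the record in the middle of that line, a
-- malformed-SDF corner where either reading is defensible.
def Pre_split_sdf_entries (text : String) : Prop :=
  ∀ l ∈ (PySem.Chars.splitOn
          (PySem.Chars.replace text.toList "\r\n".toList "\n".toList) "\n".toList).dropLast,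
    PySem.Chars.endswith l "$$$$".toList = true → l = "$$$$".toList
instance (text : String) : Decidable (Pre_split_sdf_entries text) := by
  unfold Pre_split_sdf_entries; infer_instance

def pvWitness_split_sdf_entries : String := "M  END\n$$$$\n"

def Spec_split_sdf_entries (text : String) (out : List (String × String)) : Prop :=
  out = split_sdf_entries_alt text
instance (text : String) (out : List (String × String)) : Decidable (Spec_split_sdf_entries text out) := by
  unfold Spec_split_sdf_entries; infer_instance

-- ===== CLAIM (what is proved, stated in full; the proofs are below) =====
def Claim_equal_split_sdf_entries : Prop := ∀ (text : String), Dom_split_sdf_entries text → Pre_split_sdf_entries text → Spec_split_sdf_entries text (split_sdf_entries text)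

-- ===== LEMMAS AND PROOFS =====

theorem pv_find_go_shift (sub t : List Char) (k : Nat) :
    PySem.Chars.find.go sub t k =
      if PySem.Chars.find t sub = -1 then -1 else (k : Int) + PySem.Chars.find t sub := by
  induction t generalizing k with
  | nil =>
    simp [PySem.Chars.find, PySem.Chars.find.go.eq_1]
    split <;> simp
  | cons c rest ih =>
    simp only [PySem.Chars.find]
    rw [PySem.Chars.find.go.eq_2, PySem.Chars.find.go.eq_2 sub 0]
    by_cases h : sub.isPrefixOf (c :: rest) = true
    · simp [h]
    · simp only [Bool.not_eq_true] at h
      simp only [h, Bool.false_eq_true, if_false]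
      rw [ih, ih 1]
      rcases eq_or_ne (PySem.Chars.find rest sub) (-1) with h2 | h2
      · simp [h2]
      · have := PySem.Chars.neg_one_le_find rest sub
        simp only [h2, if_false]
        split
        · omega
        · push_cast; ring

theorem pv_find_cons (sub : List Char) (c : Char) (t : List Char) :
    PySem.Chars.find (c :: t) sub =
      if sub.isPrefixOf (c :: t) then 0
      else if PySem.Chars.find t sub = -1 then -1 else 1 + PySem.Chars.find t sub := by
  simp only [PySem.Chars.find]
  rw [PySem.Chars.find.go.eq_2]
  split
  · rfl
  · rw [pv_find_go_shift]; simp [PySem.Chars.find]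

theorem pv_prefix_append_cons {sub p r : List Char} {c : Char} (hc : c ∉ sub) :
    sub <+: (p ++ c :: r) ↔ sub <+: p := by
  constructor
  · intro h
    rcases le_or_gt sub.length p.length with hl | hl
    · have h2 := h.take sub.length
      rw [List.take_append_of_le_length hl] at h2
      simp only [List.take_length] at h2
      exact h2.trans (List.take_prefix _ _)
    · exfalso
      have : p.length < sub.length := hl
      have hget := List.IsPrefix.getElem h (i := p.length) this
      rw [List.getElem_append_right (le_refl _)] at hget
      simp at hget
      exact hc (hget ▸ List.getElem_mem _)
  · intro h; exact h.trans (List.prefix_append _ _)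

-- find over p ++ c :: r when c is not a character of sub
theorem pv_find_append_cons (sub : List Char) (c : Char) (r : List Char) (hne : sub ≠ [])
    (hc : c ∉ sub) (p : List Char) :
    PySem.Chars.find (p ++ c :: r) sub =
      if PySem.Chars.find p sub = -1 then
        (if PySem.Chars.find r sub = -1 then -1 else (p.length : Int) + 1 + PySem.Chars.find r sub)
      else PySem.Chars.find p sub := by
  induction p with
  | nil =>
    have h0 : PySem.Chars.find [] sub = -1 := by
      rw [PySem.Chars.find_eq_neg_one_iff]
      intro h; exact hne (List.eq_nil_of_infix_nil h)
    have hpre : ¬ sub.isPrefixOf (c :: r) = true := by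
      intro h
      rw [List.isPrefixOf_iff_prefix] at h
      rcases sub with _ | ⟨s0, st⟩
      · exact hne rfl
      · have := h.getElem (i := 0) (by simp)
        simp at this
        exact hc (this ▸ List.mem_cons_self)
    simp only [List.nil_append, h0, if_true]
    rw [pv_find_cons]
    simp [hpre]
  | cons a p ih =>
    rw [List.cons_append, pv_find_cons, pv_find_cons (t := p)]
    have hpq : sub.isPrefixOf (a :: (p ++ c :: r)) = sub.isPrefixOf (a :: p) := by
      rw [Bool.eq_iff_iff, List.isPrefixOf_iff_prefix, List.isPrefixOf_iff_prefix]
      exact pv_prefix_append_cons (p := a :: p) hc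
    rw [hpq]
    by_cases hp : sub.isPrefixOf (a :: p) = true
    · simp [hp]
    · simp only [Bool.not_eq_true] at hp
      simp only [hp, Bool.false_eq_true, if_false, ih]
      have hrge := PySem.Chars.neg_one_le_find r sub
      have hpge := PySem.Chars.neg_one_le_find p sub
      rcases eq_or_ne (PySem.Chars.find p sub) (-1) with h1 | h1 <;>
        rcases eq_or_ne (PySem.Chars.find r sub) (-1) with h2 | h2 <;>
          simp [h1, h2] <;> omega

theorem pv_find_not_mem {s : List Char} {c : Char} (h : c ∉ s) :
    PySem.Chars.find s [c] = -1 := by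
  rw [PySem.Chars.find_eq_neg_one_iff]
  intro hi
  exact h (hi.mem (by simp))

theorem pv_find_singleton_append {p : List Char} {c : Char} (r : List Char) (h : c ∉ p) :
    PySem.Chars.find (p ++ c :: r) [c] = (p.length : Int) := by
  induction p with
  | nil => simp [pv_find_cons]
  | cons a q ih =>
    have ha : c ≠ a := fun hh => h (hh ▸ List.mem_cons_self)
    rw [List.cons_append, pv_find_cons]
    have hq : c ∉ q := fun hh => h (List.mem_cons_of_mem _ hh)
    rw [ih hq]
    have hpre : ¬ ([c].isPrefixOf (a :: (q ++ c :: r)) = true) := by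
      rw [List.isPrefixOf_iff_prefix]
      intro hp
      have := hp.getElem (i := 0) (by simp)
      simp at this
      exact ha this
    simp [hpre]
    omega

-- strip s = [] implies every char of s is whitespace, hence "M  END" is not an infix
theorem pv_strip_nil_all {s : List Char} (h : PySem.Chars.strip s = []) :
    ∀ c ∈ s, PySem.Chars.isspace c = true := by
  unfold PySem.Chars.strip PySem.Chars.rstrip PySem.Chars.lstrip at h
  rw [List.reverse_eq_nil_iff, List.dropWhile_eq_nil_iff] at h
  intro c hc
  rcases (List.mem_append.mp ((List.takeWhile_append_dropWhile (p := PySem.Chars.isspace) (l := s)) ▸ hc)) with h2 | h2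
  · exact List.mem_takeWhile_imp h2
  · exact h c (List.mem_reverse.mpr h2)

theorem pv_strip_nil_no_mend {s : List Char} (h : PySem.Chars.strip s = []) :
    ¬ ("M  END".toList <:+: s) := by
  intro hi
  have hm : 'M' ∈ s := hi.mem (by decide)
  have := pv_strip_nil_all h 'M' hm
  simp [PySem.Chars.isspace] at this

-- fuel irrelevance for splitOn.go (any fuel above the remaining length)
theorem pv_go_fuel (sep : List Char) (hsep : sep ≠ []) :
    ∀ f₁ : Nat, ∀ l cur acc, ∀ f₂ : Nat, l.length < f₁ → l.length < f₂ →
      PySem.Chars.splitOn.go sep f₁ l cur acc = PySem.Chars.splitOn.go sep f₂ l cur acc := by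
  intro f₁
  induction f₁ with
  | zero => intro l cur acc f₂ h1; omega
  | succ f ih =>
    intro l cur acc f₂ h1 h2
    match l, f₂ with
    | [], g =>
      rw [PySem.Chars.splitOn.go.eq_2 sep (f+1) _ _ (by omega),
          PySem.Chars.splitOn.go.eq_2 sep g _ _ (by omega)]
    | c :: rest, g+1 =>
      rw [PySem.Chars.splitOn.go.eq_3, PySem.Chars.splitOn.go.eq_3]
      have hs : 1 ≤ sep.length := List.length_pos_iff.mpr hsep
      split
      · exact ih _ _ _ g (by simp at h1 ⊢; omega) (by simp at h2 ⊢; omega)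
      · exact ih _ _ _ g (by simp at h1 ⊢; omega) (by simp at h2 ⊢; omega)

-- accumulator comes out in front
theorem pv_go_acc (sep : List Char) :
    ∀ f : Nat, ∀ l cur acc,
      PySem.Chars.splitOn.go sep f l cur acc = acc.reverse ++ PySem.Chars.splitOn.go sep f l cur [] := by
  intro f
  induction f with
  | zero => intro l cur acc; rw [PySem.Chars.splitOn.go.eq_1, PySem.Chars.splitOn.go.eq_1]; simp
  | succ f ih =>
    intro l cur acc
    match l with
    | [] =>
      rw [PySem.Chars.splitOn.go.eq_2 _ _ _ _ (by omega), PySem.Chars.splitOn.go.eq_2 _ _ _ _ (by omega)]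
      simp
    | c :: rest =>
      rw [PySem.Chars.splitOn.go.eq_3, PySem.Chars.splitOn.go.eq_3]
      split
      · rw [ih _ _ (cur.reverse :: acc), ih _ _ [cur.reverse]]; simp
      · exact ih _ _ _

theorem pv_go_no_occ (sep : List Char) :
    ∀ f : Nat, ∀ l cur acc, l.length < f → (∀ i, ¬ sep <+: l.drop i) →
      PySem.Chars.splitOn.go sep f l cur acc = acc.reverse ++ [cur.reverse ++ l] := by
  intro f
  induction f with
  | zero => intro l cur acc h; omega
  | succ f ih =>
    intro l cur acc hf h
    match l with
    | [] => rw [PySem.Chars.splitOn.go.eq_2 _ _ _ _ (by omega)]; simp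
    | c :: rest =>
      rw [PySem.Chars.splitOn.go.eq_3]
      rw [if_neg (by rw [Bool.not_eq_true, ← Bool.not_eq_true, List.isPrefixOf_iff_prefix]; exact h 0)]
      rw [ih rest (c :: cur) acc (by simp at hf ⊢; omega) (fun i => by simpa using h (i+1))]
      simp

theorem pv_go_first_occ (sep : List Char) (hsep : sep ≠ []) (b : List Char) :
    ∀ a : List Char, ∀ cur acc, ∀ f : Nat, (a ++ sep ++ b).length < f →
      (∀ i < a.length, ¬ sep <+: (a ++ sep ++ b).drop i) →
      PySem.Chars.splitOn.go sep f (a ++ sep ++ b) cur acc =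
        PySem.Chars.splitOn.go sep (b.length + 1) b [] ((cur.reverse ++ a) :: acc) := by
  intro a
  induction a with
  | nil =>
    intro cur acc f hf _
    match f, hf with
    | f+1, hf =>
    match sep, hsep with
    | s0 :: s', _ =>
    rw [List.nil_append, List.cons_append, PySem.Chars.splitOn.go.eq_3]
    rw [if_pos (by rw [List.isPrefixOf_iff_prefix]; exact List.prefix_append _ _)]
    rw [show List.drop (s0 :: s').length (s0 :: (s' ++ b)) = b from List.drop_left]
    simp only [List.nil_append, List.length_append, List.length_cons] at hf
    rw [pv_go_fuel (s0 :: s') (by simp) f b [] (cur.reverse :: acc) (b.length + 1) (by omega) (by omega)]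
    simp
  | cons x a' ih =>
    intro cur acc f hf hmin
    match f, hf with
    | f+1, hf =>
    rw [List.cons_append, List.cons_append, PySem.Chars.splitOn.go.eq_3]
    rw [if_neg (by rw [Bool.not_eq_true, ← Bool.not_eq_true, List.isPrefixOf_iff_prefix]
                   have := hmin 0 (by simp)
                   simpa using this)]
    rw [ih (x :: cur) acc f (by simp at hf ⊢; omega)
        (fun i hi => by simpa using hmin (i+1) (by simp; omega))]
    simp

theorem pv_splitOn_no_occ {t sep : List Char} (_hsep : sep ≠ []) (h : ¬ sep <:+: t) :
    PySem.Chars.splitOn t sep = [t] := by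
  unfold PySem.Chars.splitOn
  rw [pv_go_no_occ sep _ _ _ _ (by omega)
      (fun i hp => h (hp.isInfix.trans (List.drop_suffix i t).isInfix))]
  simp

theorem pv_splitOn_first_occ {sep : List Char} (hsep : sep ≠ []) (a b : List Char)
    (hmin : ∀ i < a.length, ¬ sep <+: (a ++ sep ++ b).drop i) :
    PySem.Chars.splitOn (a ++ sep ++ b) sep = a :: PySem.Chars.splitOn b sep := by
  unfold PySem.Chars.splitOn
  rw [pv_go_first_occ sep hsep b a [] [] _ (by omega) hmin]
  rw [pv_go_acc]
  simp

theorem pv_splitOn_ne_nil (t sep : List Char) (hsep : sep ≠ []) :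
    PySem.Chars.splitOn t sep ≠ [] := by
  by_cases h : sep <:+: t
  · have h0 : 0 ≤ PySem.Chars.find t sep := (PySem.Chars.find_nonneg_iff t sep).mpr h
    obtain ⟨hpre, hmin⟩ := PySem.Chars.find_spec h0
    obtain ⟨b, hb⟩ := hpre
    have hd : t = t.take (PySem.Chars.find t sep).toNat ++ sep ++ b := by
      rw [List.append_assoc, hb, List.take_append_drop]
    rw [hd, pv_splitOn_first_occ hsep _ _ (by
      intro i hi
      rw [← hd]
      exact hmin i (by
        have hle : (PySem.Chars.find t sep).toNat ≤ t.length := by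
          have := PySem.Chars.find_le_length t sep; omega
        simp [List.length_take] at hi; omega))]
    simp
  · rw [pv_splitOn_no_occ hsep h]; simp

-- where can an occurrence of "$$$$\n" start, relative to the first line?
theorem pv_occ_loc {p rest : List Char} (hp : '\n' ∉ p) {i : Nat}
    (h : "$$$$\n".toList <+: (p ++ '\n' :: rest).drop i) :
    (i + 4 = p.length ∧ "$$$$".toList <:+ p) ∨
    (p.length + 1 ≤ i ∧ "$$$$\n".toList <+: rest.drop (i - (p.length + 1))) := by
  rcases le_or_gt i p.length with hi | hi
  · left
    rw [List.drop_append_of_le_length hi] at h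
    set q := p.drop i with hq
    have hqno : '\n' ∉ q := fun hmem => hp (List.mem_of_mem_drop hmem)
    obtain ⟨tl, htl⟩ := h
    rcases le_or_gt 5 q.length with h5 | h5
    · exfalso
      have ht5 : List.take 5 (q ++ '\n' :: rest) = "$$$$\n".toList := by
        rw [← htl, show (5 : Nat) = ("$$$$\n".toList).length by decide, List.take_left]
      rw [List.take_append_of_le_length h5] at ht5
      exact hqno (by
        have : '\n' ∈ List.take 5 q := ht5 ▸ (by decide)
        exact List.mem_of_mem_take this)
    · have hnl : ("$$$$\n".toList)[q.length]'(by simp; omega) = '\n' := by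
        have hgl : (q ++ '\n' :: rest)[q.length]'(by simp) = '\n' := by
          rw [List.getElem_append_right (le_refl q.length)]
          simp
        have hgl2 : ("$$$$\n".toList ++ tl)[q.length]'(by simp; omega) = '\n' := by
          rw [List.getElem_of_eq htl]; exact hgl
        rw [List.getElem_append_left (by simp; omega)] at hgl2
        exact hgl2
      have hk4 : q.length = 4 := by
        by_contra hne
        have hlt : q.length < 4 := by omega
        interval_cases h : q.length <;> simp_all
      have hqd : q = "$$$$".toList := by
        have : List.take 4 (q ++ '\n' :: rest) = List.take 4 ("$$$$\n".toList ++ tl) := by rw [htl]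
        rw [List.take_append_of_le_length (by omega),
            List.take_append_of_le_length (by decide)] at this
        simpa [List.take_of_length_le (le_of_eq hk4)] using this
      constructor
      · have : q.length = p.length - i := by simp [hq]
        omega
      · exact ⟨p.take i, by rw [← hqd, hq]; exact List.take_append_drop i p⟩
  · right
    refine ⟨by omega, ?_⟩
    have : (p ++ '\n' :: rest).drop i = rest.drop (i - (p.length + 1)) := by
      rw [show p ++ '\n' :: rest = (p ++ ['\n']) ++ rest by simp]
      rw [List.drop_append, List.drop_eq_nil_of_le (by simp; omega)]
      simp
    rwa [this] at h

theorem pv_first_occ_decomp {t sep : List Char} (h : sep <:+: t) :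
    ∃ a b, t = a ++ sep ++ b ∧ ∀ i < a.length, ¬ sep <+: t.drop i := by
  have h0 : 0 ≤ PySem.Chars.find t sep := (PySem.Chars.find_nonneg_iff t sep).mpr h
  obtain ⟨hpre, hmin⟩ := PySem.Chars.find_spec h0
  obtain ⟨b, hb⟩ := hpre
  have hle : (PySem.Chars.find t sep).toNat ≤ t.length := by
    have := PySem.Chars.find_le_length t sep; omega
  refine ⟨t.take (PySem.Chars.find t sep).toNat, b, ?_, ?_⟩
  · rw [List.append_assoc, hb, List.take_append_drop]
  · intro i hi
    exact hmin i (by simp [List.length_take] at hi; omega)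

theorem pv_lines_no_nl {t : List Char} (h : '\n' ∉ t) :
    PySem.Chars.splitOn t ['\n'] = [t] := by
  apply pv_splitOn_no_occ (by simp)
  intro hi
  exact h (hi.mem (by simp))

theorem pv_lines_cons {p : List Char} (rest : List Char) (h : '\n' ∉ p) :
    PySem.Chars.splitOn (p ++ '\n' :: rest) ['\n'] = p :: PySem.Chars.splitOn rest ['\n'] := by
  have := pv_splitOn_first_occ (sep := ['\n']) (by simp) p rest ?hmin
  · simpa using this
  case hmin =>
    intro i hi hpre
    rw [List.append_assoc] at hpre
    rw [List.drop_append_of_le_length (le_of_lt hi)] at hpre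
    have := hpre.getElem (i := 0) (by simp)
    rw [List.getElem_append_left (by simp [List.length_drop]; omega)] at this
    simp at this
    exact h (this ▸ List.getElem_mem _)

theorem pv_chunks_no_nl {t : List Char} (h : '\n' ∉ t) :
    PySem.Chars.splitOn t "$$$$\n".toList = [t] := by
  apply pv_splitOn_no_occ (by decide)
  intro hi
  exact h (hi.mem (by decide))

def pvPrep (x : List Char) : List (List Char) → List (List Char)
  | [] => [x]
  | c :: cs => (x ++ c) :: cs

theorem pv_chunks_sep {p p' : List Char} (rest : List Char) (hp : '\n' ∉ p)
    (hd : p = p' ++ "$$$$".toList) :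
    PySem.Chars.splitOn (p ++ '\n' :: rest) "$$$$\n".toList
      = p' :: PySem.Chars.splitOn rest "$$$$\n".toList := by
  have heq : p ++ '\n' :: rest = p' ++ "$$$$\n".toList ++ rest := by
    rw [hd, show "$$$$\n".toList = "$$$$".toList ++ ['\n'] by decide]
    simp
  rw [heq]
  apply pv_splitOn_first_occ (by decide)
  intro i hi hpre
  rw [← heq] at hpre
  rcases pv_occ_loc hp hpre with ⟨h1, _⟩ | ⟨h1, _⟩ <;> simp [hd] at h1 <;> omega

theorem pv_chunks_step {p : List Char} (rest : List Char) (hp : '\n' ∉ p)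
    (hnd : ¬ ("$$$$".toList <:+ p)) :
    PySem.Chars.splitOn (p ++ '\n' :: rest) "$$$$\n".toList
      = pvPrep (p ++ ['\n']) (PySem.Chars.splitOn rest "$$$$\n".toList) := by
  by_cases hocc : "$$$$\n".toList <:+: rest
  · obtain ⟨a, b, hdec, hmin⟩ := pv_first_occ_decomp hocc
    have hchr : PySem.Chars.splitOn rest "$$$$\n".toList
        = a :: PySem.Chars.splitOn b "$$$$\n".toList := by
      rw [hdec]
      exact pv_splitOn_first_occ (by decide) a b (by rw [← hdec]; exact hmin)
    have hteq : p ++ '\n' :: rest = (p ++ '\n' :: a) ++ "$$$$\n".toList ++ b := by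
      rw [hdec]; simp
    rw [hteq, pv_splitOn_first_occ (by decide) (p ++ '\n' :: a) b ?hmin2, hchr]
    · simp [pvPrep]
    case hmin2 =>
      intro i hi hpre
      rw [← hteq] at hpre
      rcases pv_occ_loc hp hpre with ⟨_, h2⟩ | ⟨h1, h2⟩
      · exact hnd h2
      · refine hmin (i - (p.length + 1)) ?_ h2
        simp at hi
        omega
  · have hocct : ¬ "$$$$\n".toList <:+: (p ++ '\n' :: rest) := by
      intro hin
      have h0 : 0 ≤ PySem.Chars.find (p ++ '\n' :: rest) "$$$$\n".toList :=
        (PySem.Chars.find_nonneg_iff _ _).mpr hin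
      obtain ⟨hpre, _⟩ := PySem.Chars.find_spec h0
      rcases pv_occ_loc hp hpre with ⟨_, h2⟩ | ⟨_, h2⟩
      · exact hnd h2
      · exact hocc (h2.isInfix.trans (List.drop_suffix _ _).isInfix)
    rw [pv_splitOn_no_occ (by decide) hocct, pv_splitOn_no_occ (by decide) hocc]
    simp [pvPrep]

-- A's per-record computation, at the character-list level
def pvRecC (raw : List Char) : List (List Char × List Char) :=
  let e := PySem.Chars.find raw "M  END".toList
  if e < 0 then []
  else
    let nl := PySem.Chars.findFrom raw ['\n'] e
    if nl ≠ -1 then [(raw.take (nl + 1).toNat, raw.drop (nl + 1).toNat)]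
    else [(raw, [])]

theorem pv_recC_no_nl {raw : List Char} (h : '\n' ∉ raw) :
    pvRecC raw = if "M  END".toList <:+: raw then [(raw, [])] else [] := by
  simp only [pvRecC]
  by_cases hin : "M  END".toList <:+: raw
  · have he : 0 ≤ PySem.Chars.find raw "M  END".toList :=
      (PySem.Chars.find_nonneg_iff _ _).mpr hin
    have hle := PySem.Chars.find_le_length raw "M  END".toList
    rw [if_neg (by omega), if_pos hin]
    rw [show PySem.Chars.find raw "M  END".toList
        = ((PySem.Chars.find raw "M  END".toList).toNat : Int) by omega]
    rw [PySem.Chars.findFrom_natCast raw ['\n'] _ (by omega)]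
    rw [pv_find_not_mem (fun hm => h (List.mem_of_mem_drop hm))]
    simp
  · have hf : PySem.Chars.find raw "M  END".toList = -1 :=
      (PySem.Chars.find_eq_neg_one_iff _ _).mpr hin
    rw [if_pos (by omega), if_neg hin]

theorem pv_recC_hit {p : List Char} (r : List Char) (hp : '\n' ∉ p)
    (hin : "M  END".toList <:+: p) :
    pvRecC (p ++ '\n' :: r) = [(p ++ ['\n'], r)] := by
  simp only [pvRecC]
  have hfp : PySem.Chars.find p "M  END".toList ≠ -1 :=
    (PySem.Chars.find_ne_neg_one_iff _ _).mpr hin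
  have he : 0 ≤ PySem.Chars.find p "M  END".toList := by
    have := PySem.Chars.neg_one_le_find p "M  END".toList; omega
  have hle : (PySem.Chars.find p "M  END".toList).toNat ≤ p.length := by
    have := PySem.Chars.find_le_length p "M  END".toList; omega
  rw [pv_find_append_cons "M  END".toList '\n' r (by decide) (by decide) p]
  rw [if_neg hfp]
  set e := PySem.Chars.find p "M  END".toList with hedef
  rw [if_neg (by omega)]
  rw [show e = ((e.toNat : Nat) : Int) by omega]
  rw [PySem.Chars.findFrom_natCast _ ['\n'] _ (by simp; omega)]
  rw [List.drop_append_of_le_length hle]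
  rw [pv_find_singleton_append r (fun hm => hp (List.mem_of_mem_drop hm))]
  have hlen : (List.drop e.toNat p).length = p.length - e.toNat := by simp
  rw [hlen]
  rw [if_neg (show ¬ ((p.length - e.toNat : Nat) : Int) = -1 by omega)]
  rw [if_pos (show ((e.toNat : Nat) : Int) + ((p.length - e.toNat : Nat) : Int) ≠ -1 by omega)]
  have h1 : ((e.toNat : Int) + ↑(p.length - e.toNat) + 1).toNat = p.length + 1 := by omega
  rw [h1]
  rw [show p ++ '\n' :: r = (p ++ ['\n']) ++ r by simp]
  rw [List.take_append_of_le_length (by simp), List.drop_append_of_le_length (by simp)]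
  simp

theorem pv_recC_miss {p : List Char} (r : List Char) (hnin : ¬ ("M  END".toList <:+: p)) :
    pvRecC (p ++ '\n' :: r) = (pvRecC r).map (fun q => (p ++ '\n' :: q.1, q.2)) := by
  simp only [pvRecC]
  have hfp : PySem.Chars.find p "M  END".toList = -1 :=
    (PySem.Chars.find_eq_neg_one_iff _ _).mpr hnin
  rw [pv_find_append_cons "M  END".toList '\n' r (by decide) (by decide) p]
  rw [if_pos hfp]
  rcases eq_or_ne (PySem.Chars.find r "M  END".toList) (-1) with hr | hr
  · rw [hr]
    norm_num
  · have her : 0 ≤ PySem.Chars.find r "M  END".toList := by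
      have := PySem.Chars.neg_one_le_find r "M  END".toList; omega
    have hler : (PySem.Chars.find r "M  END".toList).toNat ≤ r.length := by
      have := PySem.Chars.find_le_length r "M  END".toList; omega
    generalize hgen : (PySem.Chars.find r "M  END".toList).toNat = en at *
    have hrn : PySem.Chars.find r "M  END".toList = ((en : Nat) : Int) := by omega
    rw [hrn]
    rw [if_neg (show ¬ ((en : Nat) : Int) = -1 by omega)]
    rw [if_neg (show ¬ ((p.length : Int) + 1 + ((en : Nat) : Int) < 0) by omega)]
    rw [if_neg (show ¬ (((en : Nat) : Int) < 0) by omega)]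
    rw [show (p.length : Int) + 1 + ((en : Nat) : Int) = (((p.length + 1 + en : Nat) : Nat) : Int) by push_cast; ring]
    rw [PySem.Chars.findFrom_natCast _ ['\n'] _ (by simp; omega)]
    rw [PySem.Chars.findFrom_natCast _ ['\n'] _ (by omega)]
    have hdr : List.drop (p.length + 1 + en) (p ++ '\n' :: r) = List.drop en r := by
      rw [show p ++ '\n' :: r = (p ++ ['\n']) ++ r by simp, List.drop_append]
      rw [List.drop_eq_nil_of_le (by simp)]
      simp
    rw [hdr]
    have hv1 := PySem.Chars.neg_one_le_find (List.drop en r) ['\n']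
    have hvle := PySem.Chars.find_le_length (List.drop en r) ['\n']
    rcases eq_or_ne (PySem.Chars.find (List.drop en r) ['\n']) (-1) with hv | hv
    · rw [hv]
      simp
    · rw [if_neg hv, if_neg hv]
      rw [if_pos (show ((p.length + 1 + en : Nat) : Int) + PySem.Chars.find (List.drop en r) ['\n'] ≠ -1 by omega)]
      rw [if_pos (show ((en : Nat) : Int) + PySem.Chars.find (List.drop en r) ['\n'] ≠ -1 by omega)]
      generalize hgv : PySem.Chars.find (List.drop en r) ['\n'] = v at *
      have hvn : v = ((v.toNat : Nat) : Int) := by omega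
      rw [hvn]
      have ht1 : (((p.length + 1 + en : Nat) : Int) + ((v.toNat : Nat) : Int) + 1).toNat
          = (p ++ ['\n']).length + (((en : Nat) : Int) + ((v.toNat : Nat) : Int) + 1).toNat := by
        simp; omega
      rw [ht1]
      rw [show p ++ '\n' :: r = (p ++ ['\n']) ++ r by simp, List.take_append, List.drop_append]
      rw [List.take_of_length_le (by simp), List.drop_eq_nil_of_le (by simp)]
      simp

def pvMk (q : List Char × List Char) : String × String := (String.ofList q.1, String.ofList q.2)

theorem pv_A_body (out : List (String × String)) (raw : List Char) :
    (if (PySem.Chars.strip raw).isEmpty then out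
     else
       let endIdx := PySem.Chars.find raw "M  END".toList
       if endIdx < 0 then out
       else
         let nl := PySem.Chars.findFrom raw "\n".toList endIdx
         let molBlock := if nl ≠ -1 then String.ofList (PySem.List.slice raw none (some (nl+1)))
                         else String.ofList raw
         let dataBlock := if nl ≠ -1 then String.ofList (PySem.List.slice raw (some (nl+1)) none)
                          else ""
         out ++ [(molBlock, dataBlock)])
    = out ++ (pvRecC raw).map pvMk := by
  rw [show "\n".toList = ['\n'] from rfl]
  by_cases hstrip : (PySem.Chars.strip raw).isEmpty
  · rw [if_pos hstrip]
    have hf : PySem.Chars.find raw "M  END".toList = -1 :=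
      (PySem.Chars.find_eq_neg_one_iff _ _).mpr
        (pv_strip_nil_no_mend (List.isEmpty_iff.mp hstrip))
    simp only [pvRecC, hf]
    norm_num
  · rw [if_neg hstrip]
    simp only [pvRecC]
    by_cases he : PySem.Chars.find raw "M  END".toList < 0
    · rw [if_pos he, if_pos he]; simp
    · rw [if_neg he, if_neg he]
      have he' : 0 ≤ PySem.Chars.find raw "M  END".toList := by omega
      have hle : (PySem.Chars.find raw "M  END".toList).toNat ≤ raw.length := by
        have := PySem.Chars.find_le_length raw "M  END".toList; omega
      by_cases hnl : PySem.Chars.findFrom raw ['\n'] (PySem.Chars.find raw "M  END".toList) ≠ -1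
      · rw [if_pos hnl, if_pos hnl, if_pos hnl]
        have h0 : 0 ≤ PySem.Chars.findFrom raw ['\n'] (PySem.Chars.find raw "M  END".toList) := by
          have hrep : PySem.Chars.findFrom raw ['\n'] (PySem.Chars.find raw "M  END".toList) = -1
              ∨ 0 ≤ PySem.Chars.findFrom raw ['\n'] (PySem.Chars.find raw "M  END".toList) := by
            rw [show PySem.Chars.find raw "M  END".toList
                = (((PySem.Chars.find raw "M  END".toList).toNat : Nat) : Int) by omega]
            rw [PySem.Chars.findFrom_natCast _ ['\n'] _ hle]
            have := PySem.Chars.neg_one_le_find (List.drop (PySem.Chars.find raw "M  END".toList).toNat raw) ['\n']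
            split <;> omega
          rcases hrep with h | h
          · exact absurd h hnl
          · exact h
        rw [PySem.List.slice_to raw (by omega), PySem.List.slice_from raw (by omega)]
        simp [pvMk]
      · rw [if_neg hnl, if_neg hnl, if_neg hnl]
        simp [pvMk]

theorem pv_A_eq (text : String) :
    split_sdf_entries text
      = ((PySem.Chars.splitOn (PySem.Chars.replace text.toList "\r\n".toList "\n".toList)
          "$$$$\n".toList).flatMap pvRecC).map pvMk := by
  unfold split_sdf_entries
  rw [PySem.List.foldl_congr_mem _ _ (fun out raw => out ++ (pvRecC raw).map pvMk) []
      (fun acc x _ => pv_A_body acc x)]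
  rw [PySem.List.foldl_append_eq_flatMap]
  simp [List.map_flatMap]

theorem pv_join_nil_flatten (parts : List (List Char)) :
    PySem.Chars.join [] parts = parts.flatten := by
  unfold PySem.Chars.join
  induction parts with
  | nil => rfl
  | cons a t ih =>
    cases t with
    | nil => simp [List.intercalate]
    | cons b t' =>
      simp [List.intercalate] at ih ⊢
      simpa using ih

-- ---------- B side, proof-level ----------

def pvRec (Ls Ds : List (List Char)) : String × String :=
  (String.ofList Ls.flatten, String.ofList Ds.flatten)

-- proof-side form of B's loop: structural recursion over the line list,
-- the last line unterminated
def pvRunN : List (List Char) → List (List Char) → Bool → List (List Char) → List (String × String)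
  | Ls, Ds, seen, [] => if seen then [pvRec Ls Ds] else []
  | Ls, Ds, seen, [p] =>
      if seen then [pvRec Ls (Ds ++ [p])]
      else if PySem.Chars.isIn "M  END".toList p then [pvRec (Ls ++ [p]) Ds] else []
  | Ls, Ds, seen, p :: q :: L =>
      if p = "$$$$".toList then
        (if seen then [pvRec Ls Ds] else []) ++ pvRunN [] [] false (q :: L)
      else if seen then pvRunN Ls (Ds ++ [p ++ ['\n']]) true (q :: L)
      else pvRunN (Ls ++ [p ++ ['\n']]) Ds (PySem.Chars.isIn "M  END".toList p) (q :: L)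

theorem pv_fold_run : ∀ (body : List (List Char)) (tail : List Char)
    (out : List (String × String)) (Ls Ds : List (List Char)) (seen : Bool),
    (let st := body.foldl pvStepAlt (out, Ls, Ds, seen);
     let st2 := if st.2.2.2 then (st.1, st.2.1, st.2.2.1 ++ [tail], true)
                else (st.1, st.2.1 ++ [tail], st.2.2.1, PySem.Chars.isIn "M  END".toList tail);
     if st2.2.2.2 then
       st2.1 ++ [(String.ofList (PySem.Chars.join [] st2.2.1), String.ofList (PySem.Chars.join [] st2.2.2.1))]
     else st2.1)
      = out ++ pvRunN Ls Ds seen (body ++ [tail]) := by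
  intro body
  induction body with
  | nil =>
    intro tail out Ls Ds seen
    simp only [List.foldl_nil, List.nil_append]
    by_cases hs : seen
    · subst hs
      simp [pvRunN, pvRec, pv_join_nil_flatten]
    · simp only [Bool.not_eq_true] at hs; subst hs
      by_cases hin : PySem.Chars.isIn ['M', ' ', ' ', 'E', 'N', 'D'] tail = true
      · simp [pvRunN, pvRec, pv_join_nil_flatten, hin]
      · simp only [Bool.not_eq_true] at hin
        simp [pvRunN, pvRec, hin]
  | cons p body' ih =>
    intro tail out Ls Ds seen
    simp only [List.foldl_cons, List.cons_append]
    obtain ⟨q, L, hqL⟩ : ∃ q L, body' ++ [tail] = q :: L := by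
      cases body' with
      | nil => exact ⟨tail, [], rfl⟩
      | cons a b => exact ⟨a, b ++ [tail], rfl⟩
    rw [hqL]
    by_cases hp : p = ['$', '$', '$', '$']
    · have hstep : pvStepAlt (out, Ls, Ds, seen) p
          = ((if seen then out ++ [(String.ofList (PySem.Chars.join [] Ls), String.ofList (PySem.Chars.join [] Ds))] else out), [], [], false) := by
        simp [pvStepAlt, hp]
      rw [hstep]
      have := ih tail (if seen then out ++ [(String.ofList (PySem.Chars.join [] Ls), String.ofList (PySem.Chars.join [] Ds))] else out) [] [] false
      rw [hqL] at this
      rw [this]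
      simp only [pvRunN, hp, if_pos]
      by_cases hs : seen
      · simp [hs, pvRec, pv_join_nil_flatten]
      · simp [hs]
    · by_cases hs : seen
      · subst hs
        have hstep : pvStepAlt (out, Ls, Ds, true) p
            = (out, Ls, Ds ++ [p ++ ['\n']], true) := by
          simp [pvStepAlt, hp]
        rw [hstep]
        have := ih tail out Ls (Ds ++ [p ++ ['\n']]) true
        rw [hqL] at this
        rw [this]
        simp [pvRunN, hp]
      · simp only [Bool.not_eq_true] at hs; subst hs
        have hstep : pvStepAlt (out, Ls, Ds, false) p
            = (out, Ls ++ [p ++ ['\n']], Ds, PySem.Chars.isIn "M  END".toList p) := by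
          simp [pvStepAlt, hp]
        rw [hstep]
        have := ih tail out (Ls ++ [p ++ ['\n']]) Ds (PySem.Chars.isIn "M  END".toList p)
        rw [hqL] at this
        rw [this]
        simp [pvRunN, hp]

theorem pv_dropLast_getLastD {α : Type} (l : List α) (h : l ≠ []) (d : α) :
    l.dropLast ++ [l.getLastD d] = l := by
  induction l generalizing d with
  | nil => exact absurd rfl h
  | cons a m ih =>
    cases m with
    | nil => rfl
    | cons b m' =>
      rw [List.dropLast_cons₂, List.getLastD_cons, List.cons_append, ih (by simp) a]

theorem pv_alt_eq (text : String) :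
    split_sdf_entries_alt text
      = pvRunN [] [] false
          (PySem.Chars.splitOn (PySem.Chars.replace text.toList "\r\n".toList "\n".toList) ['\n']) := by
  unfold split_sdf_entries_alt
  rw [show "\n".toList = ['\n'] from rfl]
  have hne : PySem.Chars.splitOn (PySem.Chars.replace text.toList "\r\n".toList "\n".toList) ['\n'] ≠ [] :=
    pv_splitOn_ne_nil _ _ (by simp)
  have h := pv_fold_run
    (PySem.Chars.splitOn (PySem.Chars.replace text.toList "\r\n".toList "\n".toList) ['\n']).dropLast
    ((PySem.Chars.splitOn (PySem.Chars.replace text.toList "\r\n".toList "\n".toList) ['\n']).getLastD [])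
    [] [] [] false
  rw [pv_dropLast_getLastD _ hne] at h
  simpa using h

-- abbreviations for the two decompositions of the text
def pvLines (t : List Char) : List (List Char) := PySem.Chars.splitOn t ['\n']
def pvChunks (t : List Char) : List (List Char) := PySem.Chars.splitOn t "$$$$\n".toList

-- hypothesis threaded through the main induction
def pvH1 (t : List Char) : Prop :=
  ∀ l ∈ (pvLines t).dropLast, "$$$$".toList <:+ l → l = "$$$$".toList

def pvMolOK (Ls : List (List Char)) : Prop :=
  ∀ s ∈ Ls, ∃ l, s = l ++ ['\n'] ∧ ¬ ("M  END".toList <:+: l)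

theorem pv_recC_prepLs {Ls : List (List Char)} (hOK : pvMolOK Ls) (c0 : List Char) :
    pvRecC (Ls.flatten ++ c0) = (pvRecC c0).map (fun q => (Ls.flatten ++ q.1, q.2)) := by
  induction Ls with
  | nil => simp
  | cons s Ls ih =>
    obtain ⟨l, rfl, hnin⟩ := hOK s List.mem_cons_self
    have hOK' : pvMolOK Ls := fun x hx => hOK x (List.mem_cons_of_mem _ hx)
    have heq : ((l ++ ['\n']) :: Ls).flatten ++ c0 = l ++ '\n' :: (Ls.flatten ++ c0) := by simp
    rw [heq, pv_recC_miss _ hnin, ih hOK']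
    simp [List.map_map]

theorem pv_first_nl_decomp {t : List Char} (h : '\n' ∈ t) :
    ∃ p rest, t = p ++ '\n' :: rest ∧ '\n' ∉ p := by
  have hd : t.dropWhile (· ≠ '\n') ≠ [] := by
    rw [Ne, List.dropWhile_eq_nil_iff]
    intro hall
    have := hall '\n' h
    simp at this
  refine ⟨t.takeWhile (· ≠ '\n'), (t.dropWhile (· ≠ '\n')).tail, ?_, ?_⟩
  · have hh : (t.dropWhile (· ≠ '\n')).head hd = '\n' := by
      have := List.head_dropWhile_not (p := fun c => c ≠ '\n') (l := t) hd
      simpa using this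
    have h2 : t.dropWhile (fun c => c ≠ '\n') = '\n' :: (t.dropWhile (fun c => c ≠ '\n')).tail := by
      conv_lhs => rw [← List.cons_head_tail hd]
      rw [hh]
    conv_lhs => rw [← List.takeWhile_append_dropWhile (p := fun c => c ≠ '\n') (l := t), h2]
  · intro hmem
    have := List.mem_takeWhile_imp hmem
    simp at this

theorem pv_prep_prep (x y : List Char) (cs : List (List Char)) :
    pvPrep x (pvPrep y cs) = pvPrep (x ++ y) cs := by
  cases cs <;> simp [pvPrep]

theorem pv_dropLast_cons {α : Type} (a : α) (l : List α) (h : l ≠ []) :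
    (a :: l).dropLast = a :: l.dropLast := by
  cases l with
  | nil => exact absurd rfl h
  | cons b m => rfl

theorem pv_recC_flatten_nil {Ls : List (List Char)} (hOK : pvMolOK Ls) :
    pvRecC Ls.flatten = [] := by
  have h := pv_recC_prepLs hOK []
  have h0 : pvRecC ([] : List Char) = [] := by decide
  simpa [h0] using h

theorem pv_main_base {t : List Char} (hnl : '\n' ∉ t) (Ls Ds : List (List Char)) :
    (pvMolOK Ls → pvH1 t →
      pvRunN Ls [] false (pvLines t)
        = ((pvPrep Ls.flatten (pvChunks t)).flatMap pvRecC).map pvMk)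
    ∧ (pvH1 t →
      pvRunN Ls Ds true (pvLines t)
        = (String.ofList Ls.flatten, String.ofList (Ds.flatten ++ (pvChunks t).headD []))
          :: (((pvChunks t).tail).flatMap pvRecC).map pvMk) := by
  have hl : pvLines t = [t] := pv_lines_no_nl hnl
  have hc : pvChunks t = [t] := pv_chunks_no_nl hnl
  rw [hl, hc]
  constructor
  · intro hOK _
    by_cases hin : "M  END".toList <:+: t
    · have hIn : PySem.Chars.isIn ['M', ' ', ' ', 'E', 'N', 'D'] t = true :=
        (PySem.Chars.isIn_iff_infix _ _).mpr hin
      have hr : pvRecC (Ls.flatten ++ t) = [(Ls.flatten ++ t, [])] := by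
        rw [pv_recC_prepLs hOK, pv_recC_no_nl hnl, if_pos hin]
        simp
      simp [pvRunN, pvPrep, hr, hIn, pvRec, pvMk]
    · have hIn : PySem.Chars.isIn ['M', ' ', ' ', 'E', 'N', 'D'] t = false :=
        (PySem.Chars.isIn_eq_false_iff _ _).mpr hin
      have hr : pvRecC (Ls.flatten ++ t) = [] := by
        rw [pv_recC_prepLs hOK, pv_recC_no_nl hnl, if_neg hin]
        simp
      simp [pvRunN, pvPrep, hr, hIn]
  · intro _
    simp [pvRunN, pvRec, pvMk]

-- the main induction: B's line pass computes A's per-chunk results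
theorem pv_main : ∀ (n : Nat) (t : List Char), t.length ≤ n → ∀ (Ls Ds : List (List Char)),
    (pvMolOK Ls → pvH1 t →
      pvRunN Ls [] false (pvLines t)
        = ((pvPrep Ls.flatten (pvChunks t)).flatMap pvRecC).map pvMk)
    ∧ (pvH1 t →
      pvRunN Ls Ds true (pvLines t)
        = (String.ofList Ls.flatten, String.ofList (Ds.flatten ++ (pvChunks t).headD []))
          :: (((pvChunks t).tail).flatMap pvRecC).map pvMk) := by
  intro n
  induction n with
  | zero =>
    intro t ht Ls Ds
    have hte : t = [] := by cases t with | nil => rfl | cons a b => simp at ht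
    subst hte
    exact pv_main_base (by simp) Ls Ds
  | succ n ih =>
    intro t ht Ls Ds
    by_cases hmem : '\n' ∈ t
    · obtain ⟨p, rest, rfl, hp⟩ := pv_first_nl_decomp hmem
      have hlen : rest.length ≤ n := by simp at ht; omega
      have hlines : pvLines (p ++ '\n' :: rest) = p :: pvLines rest := pv_lines_cons rest hp
      have hLne : pvLines rest ≠ [] := pv_splitOn_ne_nil _ _ (by simp)
      have hCne : pvChunks rest ≠ [] := pv_splitOn_ne_nil _ _ (by decide)
      obtain ⟨c, cs, hch⟩ := List.exists_cons_of_ne_nil hCne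
      have hH1 : pvH1 (p ++ '\n' :: rest) →
          (("$$$$".toList <:+ p → p = "$$$$".toList) ∧ pvH1 rest) := by
        intro h
        constructor
        · intro hsuf
          exact h p (by rw [hlines, pv_dropLast_cons _ _ hLne]; exact List.mem_cons_self) hsuf
        · intro l hl hsuf
          exact h l (by rw [hlines, pv_dropLast_cons _ _ hLne]; exact List.mem_cons_of_mem _ hl) hsuf
      by_cases hps : p = ['$', '$', '$', '$']
      · -- p is exactly the "$$$$" separator line
        have hcs : pvChunks (p ++ '\n' :: rest) = [] :: pvChunks rest :=
          pv_chunks_sep rest hp (by rw [hps]; rfl)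
        constructor
        · intro hOK h1
          obtain ⟨_, h1r⟩ := hH1 h1
          have hrec := (ih rest hlen [] []).1 (by intro s hs; simp at hs) h1r
          rw [hlines]
          obtain ⟨q, L, hqL⟩ := List.exists_cons_of_ne_nil hLne
          rw [hqL]
          have hred : pvRunN Ls [] false (p :: q :: L) = pvRunN [] [] false (q :: L) := by
            simp [pvRunN, hps]
          rw [hred, ← hqL, hrec, hcs, hch]
          have hLsrec := pv_recC_flatten_nil hOK
          simp [pvPrep, hLsrec]
        · intro h1
          obtain ⟨_, h1r⟩ := hH1 h1
          have hrec := (ih rest hlen [] []).1 (by intro s hs; simp at hs) h1r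
          rw [hlines]
          obtain ⟨q, L, hqL⟩ := List.exists_cons_of_ne_nil hLne
          rw [hqL]
          have hred : pvRunN Ls Ds true (p :: q :: L)
              = [pvRec Ls Ds] ++ pvRunN [] [] false (q :: L) := by
            simp [pvRunN, hps]
          rw [hred, ← hqL, hrec, hcs, hch]
          simp [pvPrep, pvRec]
      · -- ordinary line
        constructor
        · intro hOK h1
          obtain ⟨hsufeq, h1r⟩ := hH1 h1
          have hnsuf : ¬ ("$$$$".toList <:+ p) := fun hs => hps (hsufeq hs)
          have hcs : pvChunks (p ++ '\n' :: rest) = pvPrep (p ++ ['\n']) (pvChunks rest) :=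
            pv_chunks_step rest hp hnsuf
          rw [hlines]
          obtain ⟨q, L, hqL⟩ := List.exists_cons_of_ne_nil hLne
          rw [hqL]
          have hred : pvRunN Ls [] false (p :: q :: L)
              = pvRunN (Ls ++ [p ++ ['\n']]) [] (PySem.Chars.isIn "M  END".toList p) (q :: L) := by
            simp [pvRunN, hps]
          rw [hred, ← hqL]
          by_cases hMin : "M  END".toList <:+: p
          · have hIn : PySem.Chars.isIn "M  END".toList p = true :=
              (PySem.Chars.isIn_iff_infix _ _).mpr hMin
            have hrec := (ih rest hlen (Ls ++ [p ++ ['\n']]) []).2 h1r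
            rw [hIn, hrec, hcs, hch]
            simp only [pvPrep, List.headD_cons, List.tail_cons, List.flatMap_cons]
            have hass : Ls.flatten ++ (p ++ ['\n'] ++ c) = Ls.flatten ++ (p ++ '\n' :: c) := by simp
            rw [hass, pv_recC_prepLs hOK (p ++ '\n' :: c), pv_recC_hit c hp hMin]
            simp [pvMk]
          · have hIn : PySem.Chars.isIn "M  END".toList p = false :=
              (PySem.Chars.isIn_eq_false_iff _ _).mpr hMin
            have hOK' : pvMolOK (Ls ++ [p ++ ['\n']]) := by
              intro s hs
              rcases List.mem_append.mp hs with h1' | h1'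
              · exact hOK s h1'
              · exact ⟨p, by simpa using h1', hMin⟩
            have hrec := (ih rest hlen (Ls ++ [p ++ ['\n']]) Ds).1 hOK' h1r
            rw [hIn, hrec, hcs, pv_prep_prep]
            simp
        · intro h1
          obtain ⟨hsufeq, h1r⟩ := hH1 h1
          have hnsuf : ¬ ("$$$$".toList <:+ p) := fun hs => hps (hsufeq hs)
          have hcs : pvChunks (p ++ '\n' :: rest) = pvPrep (p ++ ['\n']) (pvChunks rest) :=
            pv_chunks_step rest hp hnsuf
          rw [hlines]
          obtain ⟨q, L, hqL⟩ := List.exists_cons_of_ne_nil hLne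
          rw [hqL]
          have hred : pvRunN Ls Ds true (p :: q :: L)
              = pvRunN Ls (Ds ++ [p ++ ['\n']]) true (q :: L) := by
            simp [pvRunN, hps]
          rw [hred, ← hqL]
          have hrec := (ih rest hlen Ls (Ds ++ [p ++ ['\n']])).2 h1r
          rw [hrec, hcs, hch]
          simp only [pvPrep, List.headD_cons, List.tail_cons]
          simp
    · exact pv_main_base hmem Ls Ds

-- ===== VERDICT (by name: the statement is the Claim_ definition above) =====
theorem split_sdf_entries_spec : Claim_equal_split_sdf_entries := by
  intro text _ hpre
  unfold Spec_split_sdf_entries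
  have h1 : pvH1 (PySem.Chars.replace text.toList "\r\n".toList "\n".toList) := by
    intro l hl hsuf
    exact hpre l hl ((PySem.Chars.endswith_iff l _).mpr hsuf)
  rw [pv_A_eq, pv_alt_eq]
  have hmain := (pv_main _ _ le_rfl [] []).1 (fun s hs => absurd hs (by simp)) h1
  unfold pvLines pvChunks at hmain
  rw [hmain]
  obtain ⟨c, cs, hch⟩ := List.exists_cons_of_ne_nil
    (pv_splitOn_ne_nil (PySem.Chars.replace text.toList "\r\n".toList "\n".toList)
      "$$$$\n".toList (by decide))
  rw [hch]
  simp [pvPrep]
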